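-- pv_equiv track=rewrite | github.com/daniel-reich/ubiquitous-fiesta | BDcaZaqCuBCczeKZL_19.py | arrow
-- ===== SOURCE A (Python) =====
-- def arrow(num):
--   ans=[]
--   if num%2:
--     for i in range(1,num+1):
--       ans.append('>'*i)
--     for j in range(num-1,0,-1):
--       ans.append('>'*j)
--   else:
--     for i in range(1,num+1):
--       ans.append('>'*i)
--     for j in range(num,0,-1):
--       ans.append('>'*j)
--   return ans
-- ===== SOURCE B (Python) =====
-- def arrow(num):
--   total = 2 * num - num % 2
--   return ['>' * min(i + 1, total - i) for i in range(total)]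
-- ===== Notes on version B (the rewrite author's own statement) =====
-- stated objective: simpler
-- what changed: Replaces the parity-branched pair of ascending/descending loops by a closed-form output length total = 2*num - num%2 and a single comprehension '>'*min(i+1, total-i).
import Mathlib
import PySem

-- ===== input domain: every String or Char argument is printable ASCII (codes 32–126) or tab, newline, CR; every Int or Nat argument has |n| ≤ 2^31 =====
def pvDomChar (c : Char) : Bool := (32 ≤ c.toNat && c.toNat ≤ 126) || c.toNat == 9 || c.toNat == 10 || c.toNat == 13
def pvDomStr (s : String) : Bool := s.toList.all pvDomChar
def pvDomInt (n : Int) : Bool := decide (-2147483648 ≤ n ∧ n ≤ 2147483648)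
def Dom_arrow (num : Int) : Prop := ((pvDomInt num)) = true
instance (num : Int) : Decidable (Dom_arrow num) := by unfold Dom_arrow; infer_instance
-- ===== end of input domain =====

-- B: one comprehension with a closed-form length (total = 2*num - num%2) instead of A's parity-branched pair of loops; same values.


-- ===== PORT A =====
-- '>' * i for an Int i; exact: Python's str-repeat gives '' for i ≤ 0, as does the toNat clamp here
def pvGtRep (i : Int) : String := String.ofList (List.replicate i.toNat '>')

def arrow (num : Int) : List String :=
  if PySem.Int.mod num 2 ≠ 0 then
    let ans := (PySem.List.pyRange 1 (num + 1) 1).foldl (fun ans i => ans ++ [pvGtRep i]) []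
    (PySem.List.pyRange (num - 1) 0 (-1)).foldl (fun ans j => ans ++ [pvGtRep j]) ans
  else
    let ans := (PySem.List.pyRange 1 (num + 1) 1).foldl (fun ans i => ans ++ [pvGtRep i]) []
    (PySem.List.pyRange num 0 (-1)).foldl (fun ans j => ans ++ [pvGtRep j]) ans

-- ===== PORT B =====
def arrow_alt (num : Int) : List String :=
  let total := 2 * num - PySem.Int.mod num 2
  (PySem.List.pyRange 0 total 1).map (fun i => String.ofList (List.replicate (min (i + 1) (total - i)).toNat '>'))

-- ===== PRECONDITION & SPEC =====
def Spec_arrow (num : Int) (out : List String) : Prop := out = arrow_alt num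
instance (num : Int) (out : List String) : Decidable (Spec_arrow num out) := by unfold Spec_arrow; infer_instance

-- ===== CLAIM (what is proved, stated in full; the proofs are below) =====
def Claim_equal_arrow : Prop := ∀ (num : Int), Dom_arrow num → Spec_arrow num (arrow num)

-- ===== LEMMAS AND PROOFS =====

-- append-accumulator loop is a map
theorem pv_foldl_app (l : List Int) (init : List String) :
    l.foldl (fun acc x => acc ++ [pvGtRep x]) init = init ++ l.map pvGtRep := by
  induction l generalizing init with
  | nil => simp
  | cons x t ih => simp [List.foldl, ih]

-- positive-odd case: A's two loops equal B's single comprehension with total = 2*num - 1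
theorem pv_arrow_odd (num : Int) (h : 0 < num) :
    (PySem.List.pyRange 1 (num + 1) 1).map pvGtRep ++ (PySem.List.pyRange (num - 1) 0 (-1)).map pvGtRep
    = (PySem.List.pyRange 0 (2 * num - 1) 1).map
        (fun i => String.ofList (List.replicate (min (i + 1) ((2 * num - 1) - i)).toNat '>')) := by
  rw [PySem.List.pyRange_one, PySem.List.pyRange_neg_one, PySem.List.pyRange_one]
  simp only [List.map_map]
  apply List.ext_getElem
  · simp; omega
  · intro i h1 h2
    rw [List.getElem_append]
    split
    · simp only [List.getElem_map, List.getElem_range, Function.comp]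
      unfold pvGtRep
      congr 2
      simp only [List.length_map, List.length_range, List.length_append] at *
      omega
    · simp only [List.getElem_map, List.getElem_range, Function.comp]
      unfold pvGtRep
      congr 2
      simp only [List.length_map, List.length_range, List.length_append] at *
      omega

-- positive-even case: total = 2*num
theorem pv_arrow_even (num : Int) (h : 0 < num) :
    (PySem.List.pyRange 1 (num + 1) 1).map pvGtRep ++ (PySem.List.pyRange num 0 (-1)).map pvGtRep
    = (PySem.List.pyRange 0 (2 * num) 1).map
        (fun i => String.ofList (List.replicate (min (i + 1) ((2 * num) - i)).toNat '>')) := by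
  rw [PySem.List.pyRange_one, PySem.List.pyRange_neg_one, PySem.List.pyRange_one]
  simp only [List.map_map]
  apply List.ext_getElem
  · simp; omega
  · intro i h1 h2
    rw [List.getElem_append]
    split
    · simp only [List.getElem_map, List.getElem_range, Function.comp]
      unfold pvGtRep
      congr 2
      simp only [List.length_map, List.length_range, List.length_append] at *
      omega
    · simp only [List.getElem_map, List.getElem_range, Function.comp]
      unfold pvGtRep
      congr 2
      simp only [List.length_map, List.length_range, List.length_append] at *
      omega

-- ===== VERDICT (by name: the statement is the Claim_ definition above) =====
theorem arrow_spec : Claim_equal_arrow := by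
  intro num _
  unfold Spec_arrow arrow arrow_alt
  have hm : PySem.Int.mod num 2 = num % 2 := by
    simp only [PySem.Int.mod]
    rw [Int.fmod_eq_emod]
    omega
  rcases Int.emod_two_eq_zero_or_one num with h2 | h2
  · -- even
    rw [hm, h2]
    simp only [ne_eq, not_true_eq_false, if_false, sub_zero]
    rw [pv_foldl_app, pv_foldl_app]
    by_cases hp : 0 < num
    · exact pv_arrow_even num hp
    · rw [PySem.List.pyRange_one_eq_nil (by omega), PySem.List.pyRange_neg_one_eq_nil (by omega),
          PySem.List.pyRange_one_eq_nil (by omega)]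
      simp
  · -- odd
    rw [hm, h2]
    simp only [ne_eq, one_ne_zero, not_false_eq_true, if_true]
    rw [pv_foldl_app, pv_foldl_app]
    by_cases hp : 0 < num
    · exact pv_arrow_odd num hp
    · rw [PySem.List.pyRange_one_eq_nil (by omega), PySem.List.pyRange_neg_one_eq_nil (by omega),
          PySem.List.pyRange_one_eq_nil (by omega)]
      simp
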